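-- pv_equiv track=rewrite | github.com/Leewonchan14/CodingTest | 백준/Gold/12100. 2048 （Easy）/2048 （Easy）.py | comibiH
-- ===== SOURCE A (Python) =====
-- def comibiH(n, k):
--     li = []
--     result = []
--
--     def recur():
--         if len(li) == k:
--             result.append(li[:])
--             return
--
--         for i in range(n):
--             li.append(i)
--             recur()
--             li.pop()
--
--     recur()
--     return result
-- ===== SOURCE B (Python) =====
-- def comibiH(n, k):
--     result = [[]]
--     for _ in range(k):
--         result = [seq + [i] for seq in result for i in range(n)]
--     return result
-- ===== Notes on version B (the rewrite author's own statement) =====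
-- stated objective: simpler
-- what changed: Replaces the recursive DFS backtracking (shared mutable list with append/recur/pop) by an iterative breadth-first product: start from [[]] and extend every partial sequence by one position per round, producing the same lexicographic order.
-- outside the precondition, e.g. on comibiH(-1, -1): A returns [], B returns [[]]
import Mathlib
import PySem

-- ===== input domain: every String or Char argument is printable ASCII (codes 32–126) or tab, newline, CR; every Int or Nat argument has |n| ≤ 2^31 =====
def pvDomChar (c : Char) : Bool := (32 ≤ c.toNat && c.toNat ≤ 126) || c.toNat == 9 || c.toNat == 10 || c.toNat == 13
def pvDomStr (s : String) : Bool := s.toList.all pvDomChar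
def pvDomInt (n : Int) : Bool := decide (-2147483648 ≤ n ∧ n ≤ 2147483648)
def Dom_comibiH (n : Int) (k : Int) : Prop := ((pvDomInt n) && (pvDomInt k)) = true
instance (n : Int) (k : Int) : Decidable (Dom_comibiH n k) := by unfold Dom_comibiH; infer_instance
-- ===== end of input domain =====

-- B replaces A's recursive DFS backtracking by an iterative breadth-first product
-- (extend all partial sequences one position per round); objective: simpler.


-- ===== PORT A =====
-- A's inner `recur`: the shared list `li` and accumulator `result` become explicit
-- parameters; the recursion depth is bounded by the fuel (k - li.length).toNat,
-- passed structurally (on inputs with 0 ≤ k the fuel-0 fallback is never reached).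
def comibiHrecur (n : Int) (k : Int) (fuel : Nat) (li : List Int) (result : List (List Int)) : List (List Int) :=
  if (li.length : Int) = k then result ++ [li]
  else
    match fuel with
    | 0 => result
    | fuel + 1 =>
      (PySem.List.pyRange 0 n 1).foldl (fun res i => comibiHrecur n k fuel (li ++ [i]) res) result

def comibiH (n : Int) (k : Int) : List (List Int) :=
  comibiHrecur n k k.toNat [] []

-- ===== PORT B =====
def comibiH_alt (n : Int) (k : Int) : List (List Int) :=
  (List.range k.toNat).foldl
    (fun result _ => result.flatMap (fun seq => (PySem.List.pyRange 0 n 1).map (fun i => seq ++ [i])))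
    [[]]

-- ===== PRECONDITION & SPEC =====
-- Pre_ excludes (a) negative k, where A's base case `len(li) == k` can never fire: for
-- n ≥ 1 A hits a RecursionError, and for n ≤ 0 A's value [] is an accident of the
-- dead base case while B's [[]] is the equally defensible empty-product answer; and
-- (b) depth k > 990 with n ≥ 1, where A's recursion hits Python's default recursion
-- limit (RecursionError near depth 1000; 990 leaves a margin for the caller's stack,
-- so a few returning inputs just under the limit are excluded too).
def Pre_comibiH (n : Int) (k : Int) : Prop := 0 ≤ k ∧ (n ≤ 0 ∨ k ≤ 990)
instance (n : Int) (k : Int) : Decidable (Pre_comibiH n k) := by unfold Pre_comibiH; infer_instance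
def pvWitness_comibiH : Int × Int := (2, 3)
def Spec_comibiH (n : Int) (k : Int) (out : List (List Int)) : Prop := out = comibiH_alt n k
instance (n : Int) (k : Int) (out : List (List Int)) : Decidable (Spec_comibiH n k out) := by unfold Spec_comibiH; infer_instance

-- ===== CLAIM (what is proved, stated in full; the proofs are below) =====
def Claim_equal_comibiH : Prop := ∀ (n : Int) (k : Int), Dom_comibiH n k → Pre_comibiH n k → Spec_comibiH n k (comibiH n k)

-- ===== LEMMAS AND PROOFS =====

lemma flatMap_single {α β : Type} (f : α → β) (l : List α) :
    l.flatMap (fun x => [f x]) = l.map f := by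
  induction l with
  | nil => rfl
  | cons x xs ih => simp [List.flatMap_cons, ih]

-- All sequences of length m over range(n), generated front-first (A's order).
def prodFront (n : Int) : Nat → List (List Int)
  | 0 => [[]]
  | m + 1 => (PySem.List.pyRange 0 n 1).flatMap (fun i => (prodFront n m).map (fun s => i :: s))

-- The front-first generator also satisfies the back-extension unfolding (B's step).
lemma prodFront_succ_back (n : Int) (m : Nat) :
    prodFront n (m + 1)
      = (prodFront n m).flatMap (fun s => (PySem.List.pyRange 0 n 1).map (fun i => s ++ [i])) := by
  induction m with
  | zero =>
    simp only [prodFront, List.map_cons, List.map_nil, List.flatMap_cons, List.flatMap_nil,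
      List.append_nil, List.nil_append]
    exact flatMap_single (fun i => [i]) _
  | succ m ih =>
    conv_rhs => rw [prodFront]
    conv_lhs => rw [prodFront, ih]
    simp [List.map_flatMap, List.flatMap_map, List.flatMap_assoc, Function.comp_def]

-- A's recursion, with fuel = remaining slots, appends `map (li ++ ·) (prodFront n fuel)`.
lemma comibiHrecur_eq (n : Int) (k : Int) :
    ∀ (fuel : Nat) (li : List Int) (result : List (List Int)),
      (li.length : Int) + fuel = k →
      comibiHrecur n k fuel li result = result ++ (prodFront n fuel).map (fun s => li ++ s) := by
  intro fuel
  induction fuel with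
  | zero =>
    intro li result h
    simp at h
    simp [comibiHrecur, h, prodFront]
  | succ fuel ih =>
    intro li result h
    have hne : (li.length : Int) ≠ k := by omega
    rw [comibiHrecur, if_neg hne]
    have main : ∀ (l : List Int) (res : List (List Int)),
        l.foldl (fun res i => comibiHrecur n k fuel (li ++ [i]) res) res
          = res ++ l.flatMap (fun i => (prodFront n fuel).map (fun s => (li ++ [i]) ++ s)) := by
      intro l
      induction l with
      | nil => intro res; simp
      | cons x xs ihl =>
        intro res
        simp only [List.foldl_cons, List.flatMap_cons]
        rw [ihl, ih (li ++ [x]) res (by simp; omega)]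
        simp [List.append_assoc]
    rw [main]
    simp [prodFront, List.map_flatMap, Function.comp_def, List.append_assoc]

-- B's fold computes prodFront step by step.
lemma alt_eq_prodFront (n : Int) (m : Nat) :
    (List.range m).foldl
      (fun result _ => result.flatMap (fun seq => (PySem.List.pyRange 0 n 1).map (fun i => seq ++ [i])))
      [[]] = prodFront n m := by
  induction m with
  | zero => simp [prodFront]
  | succ m ih =>
    rw [List.range_succ, List.foldl_append, ih, List.foldl_cons, List.foldl_nil,
      ← prodFront_succ_back]

-- ===== VERDICT (by name: the statement is the Claim_ definition above) =====
theorem comibiH_spec : Claim_equal_comibiH := by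
  intro n k _ hk
  obtain ⟨hk, -⟩ := hk
  unfold Spec_comibiH comibiH comibiH_alt
  rw [alt_eq_prodFront, comibiHrecur_eq n k k.toNat [] []
    (by simp [Int.toNat_of_nonneg hk])]
  simp
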